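-- pv_equiv track=rewrite | github.com/gp201/auto_docker_optimise | scripts/measure.py | resolve_with_deps
-- ===== SOURCE A (Python) =====
-- IMAGES = [
--     ("reduce-docker/base", "base/Dockerfile"),
--     ("reduce-docker/datascience", "datascience/Dockerfile"),
--     ("reduce-docker/deeplearning", "deeplearning/Dockerfile"),
--     ("reduce-docker/jupyterhub-datascience", "jupyterhub/datascience/Dockerfile"),
--     ("reduce-docker/jupyterhub-deeplearning", "jupyterhub/deeplearning/Dockerfile"),
-- ]
--
-- BUILD_DEPS = {
--     "reduce-docker/datascience": "reduce-docker/base",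
--     "reduce-docker/deeplearning": "reduce-docker/base",
--     "reduce-docker/jupyterhub-datascience": "reduce-docker/datascience",
--     "reduce-docker/jupyterhub-deeplearning": "reduce-docker/deeplearning",
-- }
--
-- def resolve_with_deps(images_to_build: list[str]) -> list[str]:
--     """Expand a list of image names to include all transitive dependencies."""
--     needed = set(images_to_build)
--     changed = True
--     while changed:
--         changed = False
--         for img in list(needed):
--             parent = BUILD_DEPS.get(img)
--             if parent and parent not in needed:
--                 needed.add(parent)
--                 changed = True
--     # Return in IMAGES order so parents are built before children
--     return [name for name, _ in IMAGES if name in needed]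
-- ===== SOURCE B (Python) =====
-- IMAGES = [
--     ("reduce-docker/base", "base/Dockerfile"),
--     ("reduce-docker/datascience", "datascience/Dockerfile"),
--     ("reduce-docker/deeplearning", "deeplearning/Dockerfile"),
--     ("reduce-docker/jupyterhub-datascience", "jupyterhub/datascience/Dockerfile"),
--     ("reduce-docker/jupyterhub-deeplearning", "jupyterhub/deeplearning/Dockerfile"),
-- ]
--
-- BUILD_DEPS = {
--     "reduce-docker/datascience": "reduce-docker/base",
--     "reduce-docker/deeplearning": "reduce-docker/base",
--     "reduce-docker/jupyterhub-datascience": "reduce-docker/datascience",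
--     "reduce-docker/jupyterhub-deeplearning": "reduce-docker/deeplearning",
-- }
--
-- def resolve_with_deps(images_to_build: list[str]) -> list[str]:
--     """Expand a list of image names to include all transitive dependencies."""
--     needed = set(images_to_build)
--     for img in images_to_build:
--         cur = BUILD_DEPS.get(img)
--         while cur is not None:
--             needed.add(cur)
--             cur = BUILD_DEPS.get(cur)
--     return [name for name, _ in IMAGES if name in needed]
-- ===== Notes on version B (the rewrite author's own statement) =====
-- stated objective: simpler
-- what changed: Replaces A's while-changed fixed-point loop that rescans the whole needed set until no parent can be added with a single pass over the input that walks each image's BUILD_DEPS parent chain directly.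
import Mathlib
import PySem

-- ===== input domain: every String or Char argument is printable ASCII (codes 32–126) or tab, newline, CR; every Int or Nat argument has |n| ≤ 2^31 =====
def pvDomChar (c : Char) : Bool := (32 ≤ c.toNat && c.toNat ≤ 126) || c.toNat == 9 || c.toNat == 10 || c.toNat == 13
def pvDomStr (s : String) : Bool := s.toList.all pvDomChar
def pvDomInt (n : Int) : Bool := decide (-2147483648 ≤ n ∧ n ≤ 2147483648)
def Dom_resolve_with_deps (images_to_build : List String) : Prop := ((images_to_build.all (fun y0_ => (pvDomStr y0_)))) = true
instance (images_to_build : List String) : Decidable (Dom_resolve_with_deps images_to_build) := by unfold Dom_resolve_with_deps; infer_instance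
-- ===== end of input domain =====

-- B replaces A's while-changed fixed-point rescan of the whole set by a single pass that walks
-- each input image's parent chain directly (objective: simpler).

set_option maxRecDepth 8192

-- ===== PORT A =====
-- module constants
def pvIMAGES : List (String × String) :=
  [("reduce-docker/base", "base/Dockerfile"),
   ("reduce-docker/datascience", "datascience/Dockerfile"),
   ("reduce-docker/deeplearning", "deeplearning/Dockerfile"),
   ("reduce-docker/jupyterhub-datascience", "jupyterhub/datascience/Dockerfile"),
   ("reduce-docker/jupyterhub-deeplearning", "jupyterhub/deeplearning/Dockerfile")]

def pvBUILD_DEPS : PySem.Dict String String :=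
  PySem.Dict.ofList
    [("reduce-docker/datascience", "reduce-docker/base"),
     ("reduce-docker/deeplearning", "reduce-docker/base"),
     ("reduce-docker/jupyterhub-datascience", "reduce-docker/datascience"),
     ("reduce-docker/jupyterhub-deeplearning", "reduce-docker/deeplearning")]

-- one execution of A's inner `for img in list(needed): …` loop; the final filtered output
-- below depends only on set MEMBERSHIP, so the snapshot's iteration order is immaterial.
def pvPassA (needed : PySem.Set String) : PySem.Set String × Bool :=
  needed.foldl
    (fun st img =>
      match pvBUILD_DEPS.get? img with
      | some parent =>
          if parent ≠ "" ∧ parent ∉ st.1 then (PySem.Set.add st.1 parent, true) else st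
      | none => st)
    (needed, false)

-- the `while changed:` loop; fuel 4 is provably enough: each changing pass adds one of the
-- 3 distinct parent values of BUILD_DEPS (see pvMeasure_pass below), so A always stops within 4 passes.
def pvLoopA : Nat → PySem.Set String → PySem.Set String
  | 0, s => s
  | f + 1, s =>
      let r := pvPassA s
      if r.2 then pvLoopA f r.1 else s

def resolve_with_deps (images_to_build : List String) : List String :=
  let needed := pvLoopA 4 (PySem.Set.ofList images_to_build)
  pvIMAGES.filterMap (fun p => if needed.contains p.1 then some p.1 else none)

-- ===== PORT B =====
-- B's `cur = BUILD_DEPS.get(img); while cur is not None: needed.add(cur); cur = BUILD_DEPS.get(cur)`;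
-- fuel 4 = len(BUILD_DEPS) is provably enough: the parent chains are acyclic of length ≤ 2.
def pvWalkB : Nat → Option String → PySem.Set String → PySem.Set String
  | 0, _, s => s
  | _ + 1, none, s => s
  | f + 1, some cur, s => pvWalkB f (pvBUILD_DEPS.get? cur) (PySem.Set.add s cur)

def resolve_with_deps_alt (images_to_build : List String) : List String :=
  let needed :=
    images_to_build.foldl (fun s img => pvWalkB 4 (pvBUILD_DEPS.get? img) s)
      (PySem.Set.ofList images_to_build)
  pvIMAGES.filterMap (fun p => if needed.contains p.1 then some p.1 else none)

-- ===== PRECONDITION & SPEC =====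
def Spec_resolve_with_deps (images_to_build : List String) (out : List String) : Prop := out = resolve_with_deps_alt images_to_build
instance (images_to_build : List String) (out : List String) : Decidable (Spec_resolve_with_deps images_to_build out) := by unfold Spec_resolve_with_deps; infer_instance

-- ===== CLAIM (what is proved, stated in full; the proofs are below) =====
def Claim_equal_resolve_with_deps : Prop := ∀ (images_to_build : List String), Dom_resolve_with_deps images_to_build → Spec_resolve_with_deps images_to_build (resolve_with_deps images_to_build)

-- ===== LEMMAS AND PROOFS =====

-- short names for the five image names (proof-side abbreviations only)
def pvNB : String := "reduce-docker/base"
def pvNDS : String := "reduce-docker/datascience"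
def pvNDL : String := "reduce-docker/deeplearning"
def pvNJDS : String := "reduce-docker/jupyterhub-datascience"
def pvNJDL : String := "reduce-docker/jupyterhub-deeplearning"

-- the strict ancestors of a name along BUILD_DEPS parent chains
def pvAnc (x : String) : List String :=
  if x = pvNDS then [pvNB]
  else if x = pvNDL then [pvNB]
  else if x = pvNJDS then [pvNDS, pvNB]
  else if x = pvNJDL then [pvNDL, pvNB]
  else []

-- the dependency closure, as a membership predicate
def pvCl (l : List String) (x : String) : Prop := x ∈ l ∨ ∃ y ∈ l, x ∈ pvAnc y

theorem pvGetDeps (x : String) : pvBUILD_DEPS.get? x =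
    if x = pvNDS then some pvNB
    else if x = pvNDL then some pvNB
    else if x = pvNJDS then some pvNDS
    else if x = pvNJDL then some pvNDL
    else none := by
  have h : pvBUILD_DEPS = PySem.Dict.mk
    [(pvNDS, pvNB), (pvNDL, pvNB), (pvNJDS, pvNDS), (pvNJDL, pvNDL)] := by decide
  rw [h, PySem.Dict.get?_mk_cons, PySem.Dict.get?_mk_cons, PySem.Dict.get?_mk_cons,
    PySem.Dict.get?_mk_cons]
  by_cases h1 : pvNDS = x <;> by_cases h2 : pvNDL = x <;>
    by_cases h3 : pvNJDS = x <;> by_cases h4 : pvNJDL = x <;>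
    simp only [h1, h2, h3, h4, beq_iff_eq, if_pos, eq_comm (a := x)] <;>
    simp_all [PySem.Dict.get?, eq_comm]

-- a parent and all its ancestors are ancestors
theorem pvAnc_parent {x p : String} (h : pvBUILD_DEPS.get? x = some p) :
    p ∈ pvAnc x ∧ ∀ q ∈ pvAnc p, q ∈ pvAnc x := by
  rw [pvGetDeps] at h
  split_ifs at h with h1 h2 h3 h4 <;> first
    | (cases h; subst_vars; decide)
    | cases h

-- every parent value is one of the three possible parents
theorem pvParent_vals {x p : String} (h : pvBUILD_DEPS.get? x = some p) :
    p = pvNB ∨ p = pvNDS ∨ p = pvNDL := by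
  rw [pvGetDeps] at h
  split_ifs at h <;> first | (cases h; subst_vars; decide) | cases h

theorem pvCl_parent {l : List String} {x p : String} (hx : pvCl l x)
    (h : pvBUILD_DEPS.get? x = some p) : pvCl l p := by
  rcases hx with hx | ⟨y, hy, hxy⟩
  · exact Or.inr ⟨x, hx, (pvAnc_parent h).1⟩
  · refine Or.inr ⟨y, hy, ?_⟩
    -- x ∈ pvAnc y forces y and x concrete; case-bash
    rw [pvGetDeps] at h
    unfold pvAnc at hxy ⊢
    split_ifs at hxy ⊢ <;> subst_vars <;>
      simp_all [pvNB, pvNDS, pvNDL, pvNJDS, pvNJDL] <;>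
      (rcases hxy with rfl | rfl <;> simp_all)

-- a parent-closed superset of l contains the closure
theorem pvCl_min {l : List String} {s : PySem.Set String}
    (hls : ∀ y ∈ l, y ∈ s)
    (hcl : ∀ x ∈ s, ∀ p, pvBUILD_DEPS.get? x = some p → p ≠ "" → p ∈ s) :
    ∀ x, pvCl l x → x ∈ s := by
  rintro x (hx | ⟨y, hy, hxy⟩)
  · exact hls x hx
  · have hys : y ∈ s := hls y hy
    unfold pvAnc at hxy
    split_ifs at hxy with h1 h2 h3 h4
    · subst h1
      have hb : pvNB ∈ s := hcl pvNDS hys pvNB (by rw [pvGetDeps]; decide) (by decide)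
      simp at hxy; subst hxy; exact hb
    · subst h2
      have hb : pvNB ∈ s := hcl pvNDL hys pvNB (by rw [pvGetDeps]; decide) (by decide)
      simp at hxy; subst hxy; exact hb
    · subst h3
      have hds : pvNDS ∈ s := hcl pvNJDS hys pvNDS (by rw [pvGetDeps]; decide) (by decide)
      have hb : pvNB ∈ s := hcl pvNDS hds pvNB (by rw [pvGetDeps]; decide) (by decide)
      simp at hxy
      rcases hxy with rfl | rfl
      · exact hds
      · exact hb
    · subst h4
      have hdl : pvNDL ∈ s := hcl pvNJDL hys pvNDL (by rw [pvGetDeps]; decide) (by decide)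
      have hb : pvNB ∈ s := hcl pvNDL hdl pvNB (by rw [pvGetDeps]; decide) (by decide)
      simp at hxy
      rcases hxy with rfl | rfl
      · exact hdl
      · exact hb
    · simp at hxy

-- the step function of pvPassA
def pvStepA (st : PySem.Set String × Bool) (img : String) : PySem.Set String × Bool :=
  match pvBUILD_DEPS.get? img with
  | some parent =>
      if parent ≠ "" ∧ parent ∉ st.1 then (PySem.Set.add st.1 parent, true) else st
  | none => st

-- monotonicity of a foldl of pvStepA
theorem pvFoldA_mono (items : List String) : ∀ st : PySem.Set String × Bool,
    ∀ x ∈ st.1, x ∈ (items.foldl pvStepA st).1 := by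
  induction items with
  | nil => intro st x hx; exact hx
  | cons i t ih =>
    intro st x hx
    simp only [List.foldl_cons]
    apply ih
    unfold pvStepA
    cases pvBUILD_DEPS.get? i with
    | none => exact hx
    | some p =>
      dsimp only
      split_ifs with h
      · exact (PySem.Set.mem_add _ _ _).2 (Or.inl hx)
      · exact hx

-- upper bound: the foldl only adds elements of the closure
theorem pvFoldA_upper {l : List String} (items : List String) :
    ∀ st : PySem.Set String × Bool, (∀ i ∈ items, pvCl l i) → (∀ x ∈ st.1, pvCl l x) →
    ∀ x ∈ (items.foldl pvStepA st).1, pvCl l x := by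
  induction items with
  | nil => intro st _ hst x hx; exact hst x hx
  | cons i t ih =>
    intro st hitems hst x hx
    simp only [List.foldl_cons] at hx
    refine ih _ (fun j hj => hitems j (List.mem_cons_of_mem _ hj)) ?_ x hx
    intro z hz
    unfold pvStepA at hz
    cases hg : pvBUILD_DEPS.get? i with
    | none => rw [hg] at hz; exact hst z hz
    | some p =>
      rw [hg] at hz
      dsimp only at hz
      split_ifs at hz with h
      · rcases (PySem.Set.mem_add _ _ _).1 hz with hz | hz
        · exact hst z hz
        · subst hz; exact pvCl_parent (hitems i (List.mem_cons_self)) hg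
      · exact hst z hz

-- the changed flag is sticky
theorem pvFoldA_sticky (items : List String) : ∀ st : PySem.Set String × Bool,
    st.2 = true → (items.foldl pvStepA st).2 = true := by
  induction items with
  | nil => intro st h; exact h
  | cons i t ih =>
    intro st h
    simp only [List.foldl_cons]
    apply ih
    unfold pvStepA
    cases pvBUILD_DEPS.get? i with
    | none => exact h
    | some p => dsimp only; split_ifs <;> simp [h]

-- an unchanged pass: the set is unchanged and every processed image's parent is already inside
theorem pvFoldA_nochange (items : List String) : ∀ st : PySem.Set String × Bool,
    (items.foldl pvStepA st).2 = false →
    (items.foldl pvStepA st).1 = st.1 ∧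
      ∀ i ∈ items, ∀ p, pvBUILD_DEPS.get? i = some p → p ≠ "" → p ∈ st.1 := by
  induction items with
  | nil => intro st h; exact ⟨rfl, by simp⟩
  | cons i t ih =>
    intro st h
    simp only [List.foldl_cons] at h ⊢
    have hstep : pvStepA st i = st := by
      unfold pvStepA
      cases hg : pvBUILD_DEPS.get? i with
      | none => rfl
      | some p =>
        dsimp only
        split_ifs with hc
        · exfalso
          have : (t.foldl pvStepA (PySem.Set.add st.1 p, true)).2 = true :=
            pvFoldA_sticky t _ rfl
          rw [show t.foldl pvStepA (pvStepA st i) =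
              t.foldl pvStepA (PySem.Set.add st.1 p, true) by
            unfold pvStepA; rw [hg]; dsimp only; rw [if_pos hc]] at h
          simp [this] at h
        · rfl
    rw [hstep] at h
    obtain ⟨h1, h2⟩ := ih st h
    refine ⟨by rw [hstep]; exact h1, ?_⟩
    intro j hj p hp hne
    rcases List.mem_cons.1 hj with rfl | hj
    · -- j = i took the skip branch
      unfold pvStepA at hstep
      rw [hp] at hstep
      dsimp only at hstep
      by_contra hmem
      rw [if_pos ⟨hne, hmem⟩] at hstep
      have : st.1 = PySem.Set.add st.1 p := congrArg Prod.fst hstep.symm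
      have hp' : p ∈ st.1 := by
        rw [this]; exact (PySem.Set.mem_add _ _ _).2 (Or.inr rfl)
      exact hmem hp'
    · exact h2 j hj p hp hne

-- a changing pass adds a previously missing parent value
theorem pvFoldA_progress (items : List String) : ∀ st : PySem.Set String × Bool,
    st.2 = false → (items.foldl pvStepA st).2 = true →
    ∃ p, (p = pvNB ∨ p = pvNDS ∨ p = pvNDL) ∧ p ∉ st.1 ∧
      p ∈ (items.foldl pvStepA st).1 := by
  induction items with
  | nil => intro st h ht; rw [List.foldl_nil] at ht; rw [h] at ht; cases ht
  | cons i t ih =>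
    intro st h ht
    simp only [List.foldl_cons] at ht ⊢
    cases hg : pvBUILD_DEPS.get? i with
    | none =>
      have hstep : pvStepA st i = st := by unfold pvStepA; rw [hg]
      rw [hstep] at ht ⊢
      exact ih st h ht
    | some p =>
      by_cases hc : p ≠ "" ∧ p ∉ st.1
      · -- the step on i added parent p, and the flag stays true
        have hstep : pvStepA st i = (PySem.Set.add st.1 p, true) := by
          unfold pvStepA; rw [hg]; dsimp only; rw [if_pos hc]
        rw [hstep] at ⊢ ht
        exact ⟨p, pvParent_vals hg, hc.2,
          pvFoldA_mono t _ p ((PySem.Set.mem_add _ _ _).2 (Or.inr rfl))⟩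
      · have hstep : pvStepA st i = st := by
          unfold pvStepA; rw [hg]; dsimp only; rw [if_neg hc]
        rw [hstep] at ht ⊢
        exact ih st h ht

-- how many of the three parent values are still missing from s
def pvMeasure (s : PySem.Set String) : Nat :=
  (if pvNB ∈ s then 0 else 1) + (if pvNDS ∈ s then 0 else 1) + (if pvNDL ∈ s then 0 else 1)

theorem pvMeasure_pass {s : PySem.Set String} (h : (pvPassA s).2 = true) :
    pvMeasure (pvPassA s).1 < pvMeasure s := by
  obtain ⟨p, hvals, hnot, hin⟩ := pvFoldA_progress s (s, false) rfl h
  have hmono : ∀ x ∈ s, x ∈ (pvPassA s).1 := pvFoldA_mono s (s, false)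
  have comp : ∀ q : String, (if q ∈ (pvPassA s).1 then (0 : Nat) else 1) ≤ (if q ∈ s then 0 else 1) := by
    intro q
    by_cases ha : q ∈ (pvPassA s).1
    · simp [ha]
    · have hb : q ∉ s := fun hq => ha (hmono q hq)
      simp [ha, hb]
  have hin' : p ∈ (pvPassA s).1 := hin
  have hnot' : p ∉ s := hnot
  have strict : (if p ∈ (pvPassA s).1 then (0 : Nat) else 1) < (if p ∈ s then 0 else 1) := by
    simp [hin', hnot']
  unfold pvMeasure
  rcases hvals with rfl | rfl | rfl
  · exact add_lt_add_of_lt_of_le (add_lt_add_of_lt_of_le strict (comp pvNDS)) (comp pvNDL)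
  · exact add_lt_add_of_lt_of_le (add_lt_add_of_le_of_lt (comp pvNB) strict) (comp pvNDL)
  · exact add_lt_add_of_le_of_lt (add_le_add (comp pvNB) (comp pvNDS)) strict

-- the loop computes exactly the closure, given enough fuel
theorem pvLoopA_mem {l : List String} : ∀ (f : Nat) (s : PySem.Set String),
    pvMeasure s < f → (∀ y ∈ l, y ∈ s) → (∀ x ∈ s, pvCl l x) →
    ∀ x, x ∈ pvLoopA f s ↔ pvCl l x := by
  intro f
  induction f with
  | zero => intro s hm; omega
  | succ f ih =>
    intro s hm hls hcl x
    unfold pvLoopA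
    by_cases hch : (pvPassA s).2 = true
    · rw [if_pos hch]
      refine ih (pvPassA s).1 ?_ ?_ ?_ x
      · have := pvMeasure_pass hch; omega
      · intro y hy; exact pvFoldA_mono s (s, false) y (hls y hy)
      · exact pvFoldA_upper (l := l) s (s, false) (fun i hi => hcl i hi) hcl
    · rw [if_neg hch]
      constructor
      · exact hcl x
      · intro hx
        obtain ⟨h1, h2⟩ := pvFoldA_nochange s (s, false) (by simpa using hch)
        exact pvCl_min hls (fun z hz p hp hne => h2 z hz p hp hne) x hx

-- B's chain walk from a parent pointer adds exactly the ancestors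
theorem pvWalkB_mem (img : String) (s : PySem.Set String) (x : String) :
    x ∈ pvWalkB 4 (pvBUILD_DEPS.get? img) s ↔ x ∈ s ∨ x ∈ pvAnc img := by
  have hg := pvGetDeps img
  unfold pvAnc
  split_ifs at hg ⊢ <;>
    rw [hg] <;>
    simp [pvWalkB, pvGetDeps, PySem.Set.mem_add, pvNB, pvNDS, pvNDL, pvNJDS, pvNJDL] <;>
    tauto

-- B's single pass over the input accumulates the closure
theorem pvFoldB_mem (l' : List String) : ∀ (s : PySem.Set String) (x : String),
    x ∈ l'.foldl (fun s img => pvWalkB 4 (pvBUILD_DEPS.get? img) s) s ↔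
      x ∈ s ∨ ∃ y ∈ l', x ∈ pvAnc y := by
  induction l' with
  | nil => intro s x; simp
  | cons i t ih =>
    intro s x
    simp only [List.foldl_cons]
    rw [ih, pvWalkB_mem]
    simp only [List.mem_cons]
    constructor
    · rintro (⟨h | h⟩ | ⟨y, hy, hx⟩)
      · exact Or.inl h
      · exact Or.inr ⟨i, Or.inl rfl, h⟩
      · exact Or.inr ⟨y, Or.inr hy, hx⟩
    · rintro (h | ⟨y, rfl | hy, hx⟩)
      · exact Or.inl (Or.inl h)
      · exact Or.inl (Or.inr hx)
      · exact Or.inr ⟨y, hy, hx⟩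

-- the two needed-sets agree as sets
theorem pvNeeded_agree (l : List String) (x : String) :
    x ∈ pvLoopA 4 (PySem.Set.ofList l) ↔
      x ∈ l.foldl (fun s img => pvWalkB 4 (pvBUILD_DEPS.get? img) s) (PySem.Set.ofList l) := by
  rw [pvFoldB_mem, pvLoopA_mem (l := l) 4 (PySem.Set.ofList l)]
  · unfold pvCl
    simp [PySem.Set.mem_ofList]
  · unfold pvMeasure; split_ifs <;> omega
  · intro y hy; exact (PySem.Set.mem_ofList _ _).2 hy
  · intro y hy; exact Or.inl ((PySem.Set.mem_ofList _ _).1 hy)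

-- ===== VERDICT (by name: the statement is the Claim_ definition above) =====
theorem resolve_with_deps_spec : Claim_equal_resolve_with_deps := by
  intro l _
  unfold Spec_resolve_with_deps resolve_with_deps resolve_with_deps_alt
  apply List.filterMap_congr
  intro p _
  have h : (pvLoopA 4 (PySem.Set.ofList l)).contains p.1 =
      (l.foldl (fun s img => pvWalkB 4 (pvBUILD_DEPS.get? img) s)
        (PySem.Set.ofList l)).contains p.1 := by
    rw [Bool.eq_iff_iff]
    simpa using pvNeeded_agree l p.1
  rw [h]
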